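-- pv_equiv track=rewrite | github.com/Vaoth/aoc-2021 | day4.py | retrieve_boards
-- ===== SOURCE A (Python) =====
-- def retrieve_boards(lines, length):
--     cells = lines.split()
--     cells = [int(cell) for cell in cells]
--     boards = []
--     for i in range(0, len(cells), length * length):
--         board = []
--         for j in range(0, len(cells[i:i + length * length]), length):
--             board.append(cells[i + j:i + j + length])
--         boards.append(board)
--     return boards
-- ===== SOURCE B (Python) =====
-- def retrieve_boards(lines, length):
--     boards, board, row = [], [], []
--     for token in lines.split():
--         row.append(int(token))
--         if len(row) == length:
--             board.append(row)
--             row = []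
--             if len(board) == length:
--                 boards.append(board)
--                 board = []
--     if row:
--         board.append(row)
--     if board:
--         boards.append(board)
--     return boards
-- ===== Notes on version B (the rewrite author's own statement) =====
-- stated objective: alternative
-- what changed: B is a single streaming pass with three accumulators (current row, current board, boards): each parsed token is appended to the current row, which is flushed into the board when full, which in turn is flushed into the boards list when it has `length` rows, with trailing partials flushed at the end — no index arithmetic and no slicing, versus A's two nested stride-slicing loops over the materialised cell list.
-- intended difference: For negative length with at least one token A returns ceil(n/length^2) copies of the empty board (its inner row loop never runs), while B's row-fill condition never fires and it returns a single board holding all cells as one row; a negative board size is nonsensical and B's value at least preserves the parsed cells. — e.g. on retrieve_boards("1", -1): A returns [[]], B returns [[[1]]]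
import Mathlib
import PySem

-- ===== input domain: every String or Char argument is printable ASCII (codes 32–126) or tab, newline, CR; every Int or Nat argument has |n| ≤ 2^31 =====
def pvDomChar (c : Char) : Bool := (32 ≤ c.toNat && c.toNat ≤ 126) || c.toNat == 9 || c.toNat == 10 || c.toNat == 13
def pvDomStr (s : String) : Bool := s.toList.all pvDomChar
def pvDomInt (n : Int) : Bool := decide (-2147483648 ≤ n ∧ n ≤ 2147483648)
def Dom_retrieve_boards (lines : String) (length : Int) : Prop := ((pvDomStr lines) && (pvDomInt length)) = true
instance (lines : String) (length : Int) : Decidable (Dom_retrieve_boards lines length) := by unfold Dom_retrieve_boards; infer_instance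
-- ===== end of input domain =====

-- B replaces A's two nested stride-slicing loops by one streaming pass with three
-- accumulators (row, board, boards), flushing a row/board whenever it is full; objective: alternative.

-- ===== PORT A =====
def retrieve_boards (lines : String) (length : Int) : List (List (List Int)) :=
  let cells : List Int :=
    (PySem.Str.split₀ lines).map (fun c => (PySem.Int.ofStr? c).getD 0)  -- int(cell); Pre_ admits only inputs where every token parses
  (PySem.List.pyRange 0 (cells.length : Int) (length * length)).foldl
    (fun boards i =>
      let board :=
        (PySem.List.pyRange 0
            ((PySem.List.slice cells (some i) (some (i + length * length))).length : Int)
            length).foldl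
          (fun board j =>
            board ++ [PySem.List.slice cells (some (i + j)) (some (i + j + length))]) []
      boards ++ [board]) []

-- ===== PORT B =====
-- one loop iteration of Source B: append int(token) to the current row, flush full row / full board
def rbStep (length : Int) (st : List (List (List Int)) × List (List Int) × List Int)
    (token : String) : List (List (List Int)) × List (List Int) × List Int :=
  let row := st.2.2 ++ [(PySem.Int.ofStr? token).getD 0]
  if (row.length : Int) = length then
    let board := st.2.1 ++ [row]
    if (board.length : Int) = length then (st.1 ++ [board], [], [])
    else (st.1, board, [])
  else (st.1, st.2.1, row)

def retrieve_boards_alt (lines : String) (length : Int) : List (List (List Int)) :=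
  let st := (PySem.Str.split₀ lines).foldl (rbStep length) ([], [], [])
  let board := if st.2.2 ≠ [] then st.2.1 ++ [st.2.2] else st.2.1
  if board ≠ [] then st.1 ++ [board] else st.1

-- ===== PRECONDITION & SPEC =====
-- Pre_ excludes exactly the inputs where Python A raises: length = 0 (range() ValueError)
-- and tokens int() cannot parse (ValueError).
def Pre_retrieve_boards (lines : String) (length : Int) : Prop :=
  length ≠ 0 ∧ ∀ c ∈ PySem.Str.split₀ lines, (PySem.Int.ofStr? c).isSome
instance (lines : String) (length : Int) : Decidable (Pre_retrieve_boards lines length) := by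
  unfold Pre_retrieve_boards; infer_instance
def pvWitness_retrieve_boards : String × Int := ("1 2 3 4", 2)

-- For negative length with at least one token A returns ceil(n/length^2) copies of the empty
-- board (its inner row loop never runs), while B's row-fill test never fires and it returns a
-- single board holding all cells as one row; a negative board size is nonsensical and B's value
-- at least preserves the parsed cells.
def D_retrieve_boards (lines : String) (length : Int) : Prop :=
  length < 0 ∧ PySem.Str.split₀ lines ≠ []
instance (lines : String) (length : Int) : Decidable (D_retrieve_boards lines length) := by
  unfold D_retrieve_boards; infer_instance
def Spec_retrieve_boards (lines : String) (length : Int) (out : List (List (List Int))) : Prop :=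
  ¬ D_retrieve_boards lines length → out = retrieve_boards_alt lines length
instance (lines : String) (length : Int) (out : List (List (List Int))) : Decidable (Spec_retrieve_boards lines length out) := by
  unfold Spec_retrieve_boards; infer_instance
def pvDiffWitness_retrieve_boards : String × Int := ("1", -1)
def pvDiffWitnessOut_retrieve_boards : (List (List (List Int))) × (List (List (List Int))) :=
  ([[]], [[[1]]])

-- ===== CLAIM (what is proved, stated in full; the proofs are below) =====
def Claim_unchanged_retrieve_boards : Prop := ∀ (lines : String) (length : Int), Dom_retrieve_boards lines length → Pre_retrieve_boards lines length → Spec_retrieve_boards lines length (retrieve_boards lines length)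
def Claim_changed_retrieve_boards : Prop := Dom_retrieve_boards (pvDiffWitness_retrieve_boards.1) (pvDiffWitness_retrieve_boards.2) ∧ Pre_retrieve_boards (pvDiffWitness_retrieve_boards.1) (pvDiffWitness_retrieve_boards.2) ∧ D_retrieve_boards (pvDiffWitness_retrieve_boards.1) (pvDiffWitness_retrieve_boards.2) ∧ retrieve_boards (pvDiffWitness_retrieve_boards.1) (pvDiffWitness_retrieve_boards.2) = pvDiffWitnessOut_retrieve_boards.1 ∧ retrieve_boards_alt (pvDiffWitness_retrieve_boards.1) (pvDiffWitness_retrieve_boards.2) = pvDiffWitnessOut_retrieve_boards.2 ∧ pvDiffWitnessOut_retrieve_boards.1 ≠ pvDiffWitnessOut_retrieve_boards.2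
def Claim_exact_retrieve_boards : Prop := ∀ (lines : String) (length : Int), Dom_retrieve_boards lines length → Pre_retrieve_boards lines length → D_retrieve_boards lines length → retrieve_boards lines length ≠ retrieve_boards_alt lines length

-- ===== LEMMAS AND PROOFS =====

-- chunks k xs = xs cut into consecutive pieces of size k+1 (the last may be shorter)
def chunks {α : Type} (k : Nat) : List α → List (List α)
  | [] => []
  | x :: xs => (x :: xs.take k) :: chunks k (xs.drop k)
termination_by xs => xs.length
decreasing_by simp

theorem chunks_nil {α : Type} (k : Nat) : chunks (α := α) k [] = [] := by
  rw [chunks]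

theorem chunks_cons {α : Type} (k : Nat) (x : α) (xs : List α) :
    chunks k (x :: xs) = (x :: xs.take k) :: chunks k (xs.drop k) := by
  rw [chunks]

-- the range-with-step slicing loop IS chunks
theorem range_chunks {α : Type} (k : Nat) (xs : List α) :
    (List.range ((xs.length + k) / (k + 1))).map
      (fun j => (xs.drop ((k + 1) * j)).take (k + 1)) = chunks k xs := by
  induction hn : xs.length using Nat.strong_induction_on generalizing xs with
  | _ n ih =>
  subst hn
  cases xs with
  | nil =>
    rw [show (([] : List α).length + k) / (k + 1) = 0 from
      Nat.div_eq_of_lt (by simp only [List.length_nil]; omega), chunks_nil]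
    rfl
  | cons x t =>
    have hcount : ((x :: t).length + k) / (k + 1) = ((t.drop k).length + k) / (k + 1) + 1 := by
      simp only [List.length_cons, List.length_drop]
      rcases Nat.lt_or_ge t.length k with h' | h
      · have e1 : t.length - k = 0 := by omega
        have e2 : (0 + k) / (k + 1) = 0 := Nat.div_eq_of_lt (by omega)
        have e3 : (t.length + 1 + k) / (k + 1) = 1 := by
          apply Nat.div_eq_of_lt_le <;> omega
        rw [e1, e2, e3]
      · have e : t.length + 1 + k = (t.length - k + k) + (k + 1) := by omega
        rw [e, Nat.add_div_right _ (Nat.succ_pos k)]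
    rw [hcount, List.range_succ_eq_map, List.map_cons, List.map_map, chunks_cons]
    have ihd := ih (t.drop k).length
      (by simp only [List.length_drop, List.length_cons]; omega) (t.drop k) rfl
    congr 1
    rw [← ihd]
    apply List.map_congr_left
    intro j _
    show ((x :: t).drop ((k + 1) * (j + 1))).take (k + 1)
        = ((t.drop k).drop ((k + 1) * j)).take (k + 1)
    rw [List.drop_drop]
    have e : (k + 1) * (j + 1) = ((k + 1) * j + k) + 1 := by ring
    have e2 : k + (k + 1) * j = (k + 1) * j + k := by ring
    rw [e, List.drop_succ_cons, e2]

theorem take_chunks {α : Type} (k : Nat) (m : Nat) (xs : List α) :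
    (chunks k xs).take m = chunks k (xs.take (m * (k + 1))) := by
  induction m generalizing xs with
  | zero => simp [chunks_nil]
  | succ m ih =>
    cases xs with
    | nil => simp [chunks_nil]
    | cons x t =>
      rw [chunks_cons, List.take_succ_cons, ih]
      have e : (m + 1) * (k + 1) = (m * (k + 1) + k) + 1 := by ring
      rw [e, List.take_succ_cons, chunks_cons]
      have e1 : (t.take (m * (k + 1) + k)).take k = t.take k := by
        rw [List.take_take]
        congr 1
        omega
      have e2 : (t.take (m * (k + 1) + k)).drop k = (t.drop k).take (m * (k + 1)) := by
        rw [List.drop_take]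
        congr 1
        omega
      rw [e1, e2]

theorem drop_chunks {α : Type} (k : Nat) (m : Nat) (xs : List α) :
    (chunks k xs).drop m = chunks k (xs.drop (m * (k + 1))) := by
  induction m generalizing xs with
  | zero => simp
  | succ m ih =>
    cases xs with
    | nil => simp [chunks_nil]
    | cons x t =>
      rw [chunks_cons, List.drop_succ_cons, ih, List.drop_drop]
      have e : (m + 1) * (k + 1) = (k + m * (k + 1)) + 1 := by ring
      rw [e, List.drop_succ_cons]

theorem double_chunk {α : Type} (k : Nat) (xs : List α) :
    chunks k (chunks k xs) = (chunks (k * k + 2 * k) xs).map (chunks k) := by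
  induction hn : xs.length using Nat.strong_induction_on generalizing xs with
  | _ n ih =>
  subst hn
  cases xs with
  | nil => simp [chunks_nil]
  | cons x t =>
    rw [chunks_cons (k := k * k + 2 * k), List.map_cons]
    rw [chunks_cons (k := k) x t, chunks_cons]
    congr 1
    · rw [chunks_cons]
      have e1 : (t.take (k * k + 2 * k)).take k = t.take k := by
        rw [List.take_take]
        congr 1
        omega
      have e2 : (t.take (k * k + 2 * k)).drop k = (t.drop k).take (k * (k + 1)) := by
        rw [List.drop_take]
        congr 1
        have h : k * (k + 1) = k * k + k := by ring
        omega
      rw [e1, e2, take_chunks]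
    · rw [drop_chunks, List.drop_drop]
      have e3 : k + k * (k + 1) = k * k + 2 * k := by ring
      rw [e3]
      exact ih (t.drop (k * k + 2 * k)).length
        (by simp only [List.length_drop, List.length_cons]; omega) _ rfl

-- counting: the positive-step range over [0, len) has ceil(len / s) elements
theorem count_eq (n M : Nat) :
    (if (0 : Int) < (n : Int)
      then (((n : Int) - 0 + ((M + 1 : Nat) : Int) - 1) / ((M + 1 : Nat) : Int)).toNat
      else 0) = (n + M) / (M + 1) := by
  rcases Nat.eq_zero_or_pos n with h | h
  · subst h
    simp [Nat.div_eq_of_lt (by omega : M < M + 1)]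
  · rw [if_pos (by exact_mod_cast h)]
    have h1 : ((n : Int) - 0 + ((M + 1 : Nat) : Int) - 1) = ((n + M : Nat) : Int) := by
      push_cast
      ring
    rw [h1, ← Int.natCast_div, Int.toNat_natCast]

theorem slice_mul {α : Type} (xs : List α) (s q : Nat) :
    PySem.List.slice xs (some ((0 : Int) + ((s : Nat) : Int) * ((q : Nat) : Int)))
      (some ((0 : Int) + ((s : Nat) : Int) * ((q : Nat) : Int) + ((s : Nat) : Int)))
      = (xs.drop (s * q)).take s := by
  have h1 : ((0 : Int) + ((s : Nat) : Int) * ((q : Nat) : Int)) = ((s * q : Nat) : Int) := by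
    push_cast
    ring
  rw [h1]
  exact PySem.List.slice_natCast_add xs (s * q) s

-- a positive-step slicing loop over a list is chunks
theorem map_slice_eq_chunks {α : Type} (xs : List α) (M : Nat) :
    (PySem.List.pyRange 0 (xs.length : Int) ((M + 1 : Nat) : Int)).map
      (fun i => PySem.List.slice xs (some i) (some (i + ((M + 1 : Nat) : Int))))
      = chunks M xs := by
  have hpos : (0 : Int) < ((M + 1 : Nat) : Int) := by exact_mod_cast Nat.succ_pos M
  rw [PySem.List.pyRange_of_pos _ _ hpos, List.map_map]
  rw [count_eq xs.length M, ← range_chunks M xs]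
  apply List.map_congr_left
  intro j _
  exact slice_mul xs (M + 1) j

-- one board of A: the inner row loop over a board slice is chunks of that slice
theorem inner_board (cells : List Int) (M i' : Nat) :
    (PySem.List.pyRange 0
        ((PySem.List.slice cells (some ((i' : Nat) : Int))
            (some (((i' : Nat) : Int) + ((M * M + 2 * M + 1 : Nat) : Int)))).length : Int)
        ((M + 1 : Nat) : Int)).map
      (fun j => PySem.List.slice cells (some (((i' : Nat) : Int) + j))
        (some (((i' : Nat) : Int) + j + ((M + 1 : Nat) : Int))))
      = chunks M (PySem.List.slice cells (some ((i' : Nat) : Int))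
          (some (((i' : Nat) : Int) + ((M * M + 2 * M + 1 : Nat) : Int)))) := by
  have hsl : PySem.List.slice cells (some ((i' : Nat) : Int))
      (some (((i' : Nat) : Int) + ((M * M + 2 * M + 1 : Nat) : Int)))
      = (cells.drop i').take (M * M + 2 * M + 1) :=
    PySem.List.slice_natCast_add cells i' (M * M + 2 * M + 1)
  rw [hsl, ← map_slice_eq_chunks ((cells.drop i').take (M * M + 2 * M + 1)) M]
  apply List.map_congr_left
  intro j hj
  have hpos : (0 : Int) < ((M + 1 : Nat) : Int) := by exact_mod_cast Nat.succ_pos M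
  obtain ⟨hj0, hjlt, hdvd⟩ := (PySem.List.mem_pyRange_iff_of_pos hpos j).1 hj
  obtain ⟨c, hc⟩ := hdvd
  rw [sub_zero] at hc
  have hc0 : 0 ≤ c := by
    by_contra hneg
    push Not at hneg
    have : ((M + 1 : Nat) : Int) * c < 0 := mul_neg_of_pos_of_neg hpos hneg
    omega
  obtain ⟨q, rfl⟩ : ∃ q : Nat, j = (((M + 1) * q : Nat) : Int) := by
    refine ⟨c.toNat, ?_⟩
    rw [hc]
    push_cast [Int.toNat_of_nonneg hc0]
    ring
  set ys := (cells.drop i').take (M * M + 2 * M + 1) with hys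
  have hlenys : ys.length ≤ (M + 1) * (M + 1) := by
    have h2 : M * M + 2 * M + 1 = (M + 1) * (M + 1) := by ring
    calc ys.length ≤ M * M + 2 * M + 1 := List.length_take_le _ _
    _ = (M + 1) * (M + 1) := h2
  have hqlt : (M + 1) * q < ys.length := by exact_mod_cast hjlt
  have hq : (M + 1) * q + (M + 1) ≤ (M + 1) * (M + 1) := by
    have hqM : q < M + 1 := by
      by_contra hge
      push Not at hge
      have := Nat.mul_le_mul_left (M + 1) hge
      omega
    calc (M + 1) * q + (M + 1) = (M + 1) * (q + 1) := by ring
    _ ≤ (M + 1) * (M + 1) := Nat.mul_le_mul_left _ hqM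
  have e1 : PySem.List.slice cells (some (((i' : Nat) : Int) + (((M + 1) * q : Nat) : Int)))
      (some (((i' : Nat) : Int) + (((M + 1) * q : Nat) : Int) + ((M + 1 : Nat) : Int)))
      = (cells.drop (i' + (M + 1) * q)).take (M + 1) := by
    have h1 : ((i' : Nat) : Int) + (((M + 1) * q : Nat) : Int)
        = ((i' + (M + 1) * q : Nat) : Int) := by
      push_cast
      ring
    rw [h1]
    exact PySem.List.slice_natCast_add cells (i' + (M + 1) * q) (M + 1)
  have e2 : PySem.List.slice ys (some (((M + 1) * q : Nat) : Int))
      (some ((((M + 1) * q : Nat) : Int) + ((M + 1 : Nat) : Int)))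
      = (ys.drop ((M + 1) * q)).take (M + 1) :=
    PySem.List.slice_natCast_add ys ((M + 1) * q) (M + 1)
  rw [e1, e2, hys, List.drop_take, List.take_take, List.drop_drop]
  congr 1
  have h2 : M * M + 2 * M + 1 = (M + 1) * (M + 1) := by ring
  omega

-- pyRange with equal endpoints is empty (any step)
theorem pyRange_zero_stop (s : Int) : PySem.List.pyRange 0 0 s = [] := by
  simp [PySem.List.pyRange]

-- a negative-step range from 0 up to a nonnegative stop is empty
theorem pyRange_neg_step (b s : Int) (hb : 0 ≤ b) (hs : s < 0) :
    PySem.List.pyRange 0 b s = [] := by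
  simp only [PySem.List.pyRange]
  rw [if_neg (by omega : ¬ s = 0), if_neg (by omega : ¬ 0 < s), if_neg (by omega : ¬ b < 0)]
  simp

-- A, for positive length M+1, computes chunks M (chunks M cells)
theorem portA_eq_chunks (lines : String) (M : Nat) :
    retrieve_boards lines ((M + 1 : Nat) : Int)
      = chunks M (chunks M
          ((PySem.Str.split₀ lines).map (fun c => (PySem.Int.ofStr? c).getD 0))) := by
  set cells : List Int :=
    (PySem.Str.split₀ lines).map (fun c => (PySem.Int.ofStr? c).getD 0) with hcells
  simp only [retrieve_boards]
  rw [← hcells]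
  have hLL : ((M + 1 : Nat) : Int) * ((M + 1 : Nat) : Int)
      = ((M * M + 2 * M + 1 : Nat) : Int) := by
    push_cast
    ring
  rw [double_chunk, ← map_slice_eq_chunks cells (M * M + 2 * M)]
  rw [PySem.List.foldl_append_singleton_eq_map, List.nil_append, hLL, List.map_map]
  apply List.map_congr_left
  intro i hi
  have hpos : (0 : Int) < ((M * M + 2 * M + 1 : Nat) : Int) := by
    exact_mod_cast Nat.succ_pos _
  obtain ⟨h0, -, -⟩ := (PySem.List.mem_pyRange_iff_of_pos hpos i).1 hi
  obtain ⟨i', rfl⟩ : ∃ i' : Nat, i = ((i' : Nat) : Int) :=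
    ⟨i.toNat, (Int.toNat_of_nonneg h0).symm⟩
  rw [PySem.List.foldl_append_singleton_eq_map, List.nil_append]
  exact inner_board cells M i'

-- B's loop body in terms of the parsed cell (rbStep applied to a token IS this, definitionally)
def rbStepC (length : Int) (st : List (List (List Int)) × List (List Int) × List Int)
    (c : Int) : List (List (List Int)) × List (List Int) × List Int :=
  let row := st.2.2 ++ [c]
  if (row.length : Int) = length then
    let board := st.2.1 ++ [row]
    if (board.length : Int) = length then (st.1 ++ [board], [], [])
    else (st.1, board, [])
  else (st.1, st.2.1, row)

-- B's trailing flush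
def rbFinish (st : List (List (List Int)) × List (List Int) × List Int) :
    List (List (List Int)) :=
  let board := if st.2.2 ≠ [] then st.2.1 ++ [st.2.2] else st.2.1
  if board ≠ [] then st.1 ++ [board] else st.1

theorem portB_eq_finish (lines : String) (length : Int) :
    retrieve_boards_alt lines length
      = rbFinish (((PySem.Str.split₀ lines).map
            (fun c => (PySem.Int.ofStr? c).getD 0)).foldl (rbStepC length) ([], [], [])) := by
  simp only [retrieve_boards_alt, rbFinish, List.foldl_map]
  rfl

theorem rbFinish_def (boards : List (List (List Int))) (board : List (List Int))
    (row : List Int) :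
    rbFinish (boards, board, row)
      = if row ≠ [] then boards ++ [board ++ [row]]
        else if board ≠ [] then boards ++ [board] else boards := by
  simp only [rbFinish]
  by_cases hr : row = [] <;> by_cases hb : board = [] <;> simp [hr, hb]

theorem chunks_single {α : Type} (M : Nat) (xs : List α) (hne : xs ≠ [])
    (hlen : xs.length ≤ M + 1) : chunks M xs = [xs] := by
  cases xs with
  | nil => exact absurd rfl hne
  | cons x t =>
    rw [chunks_cons]
    have ht : t.length ≤ M := by simp at hlen; omega
    rw [List.take_of_length_le ht, List.drop_of_length_le ht, chunks_nil]

theorem chunks_append_full {α : Type} (M : Nat) (ys zs : List α)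
    (hlen : ys.length = M + 1) : chunks M (ys ++ zs) = ys :: chunks M zs := by
  cases ys with
  | nil => simp at hlen
  | cons y t =>
    have ht : t.length = M := by simpa using hlen
    rw [List.cons_append, chunks_cons]
    rw [show M = t.length from ht.symm, List.take_left, List.drop_left]

-- the streaming loop invariant: from any partial state, the flushed result is
-- the previously emitted boards followed by the double-chunking of the rest
theorem stream_eq (M : Nat) (cells : List Int) :
    ∀ (boards : List (List (List Int))) (board : List (List Int)) (row : List Int),
      row.length ≤ M → board.length ≤ M →
      rbFinish (cells.foldl (rbStepC ((M + 1 : Nat) : Int)) (boards, board, row))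
        = boards ++ chunks M (board ++ chunks M (row ++ cells)) := by
  induction cells with
  | nil =>
    intro boards board row hrow hboard
    simp only [List.foldl_nil, List.append_nil, rbFinish_def]
    by_cases hr : row = []
    · subst hr
      rw [if_neg (by simp)]
      by_cases hb : board = []
      · subst hb
        simp [chunks_nil]
      · rw [if_pos hb, chunks_nil, List.append_nil, chunks_single M board hb (by omega)]
    · rw [if_pos hr, chunks_single M row hr (by omega),
        chunks_single M (board ++ [row]) (by simp) (by simp; omega)]
  | cons c cs ih =>
    intro boards board row hrow hboard
    rw [List.foldl_cons]
    have hstep : rbStepC ((M + 1 : Nat) : Int) (boards, board, row) c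
        = if ((row ++ [c]).length : Int) = ((M + 1 : Nat) : Int) then
            (if ((board ++ [row ++ [c]]).length : Int) = ((M + 1 : Nat) : Int) then
              (boards ++ [board ++ [row ++ [c]]], ([] : List (List Int)), ([] : List Int))
            else (boards, board ++ [row ++ [c]], ([] : List Int)))
          else (boards, board, row ++ [c]) := rfl
    rw [hstep]
    have hrc : row ++ c :: cs = (row ++ [c]) ++ cs := by
      rw [List.append_assoc]; rfl
    by_cases h : row.length = M
    · have hlen : ((row ++ [c]).length : Int) = ((M + 1 : Nat) : Int) := by
        simp [h]
      rw [if_pos hlen]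
      have hchunk : chunks M (row ++ c :: cs) = (row ++ [c]) :: chunks M cs := by
        rw [hrc]
        exact chunks_append_full M (row ++ [c]) cs (by simp [h])
      by_cases hb : board.length = M
      · have hblen : ((board ++ [row ++ [c]]).length : Int) = ((M + 1 : Nat) : Int) := by
          simp [hb]
        rw [if_pos hblen]
        rw [ih (boards ++ [board ++ [row ++ [c]]]) [] [] (by simp) (by simp)]
        rw [hchunk]
        have : board ++ (row ++ [c]) :: chunks M cs
            = (board ++ [row ++ [c]]) ++ chunks M cs := by
          rw [List.append_assoc]; rfl
        rw [this, chunks_append_full M (board ++ [row ++ [c]]) (chunks M cs) (by simp [hb])]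
        simp
      · have hblen : ¬ ((board ++ [row ++ [c]]).length : Int) = ((M + 1 : Nat) : Int) := by
          simp only [List.length_append, List.length_cons, List.length_nil]
          intro hcontra
          exact hb (by exact_mod_cast (by omega : (board.length : Int) = (M : Int)))
        rw [if_neg hblen]
        rw [ih boards (board ++ [row ++ [c]]) [] (by simp) (by simp; omega)]
        rw [hchunk]
        congr 2
        rw [List.append_assoc]
        rfl
    · have hlen : ¬ ((row ++ [c]).length : Int) = ((M + 1 : Nat) : Int) := by
        simp only [List.length_append, List.length_cons, List.length_nil]
        intro hcontra
        exact h (by exact_mod_cast (by omega : (row.length : Int) = (M : Int)))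
      rw [if_neg hlen]
      rw [ih boards board (row ++ [c]) (by simp; omega) hboard]
      rw [hrc]

-- with a negative length, B's flush conditions never fire: the row just accumulates
theorem foldl_neg (length : Int) (hneg : length < 0) (cells : List Int) :
    ∀ (boards : List (List (List Int))) (board : List (List Int)) (row : List Int),
      cells.foldl (rbStepC length) (boards, board, row) = (boards, board, row ++ cells) := by
  induction cells with
  | nil => intro boards board row; simp
  | cons c cs ih =>
    intro boards board row
    rw [List.foldl_cons]
    have hstep : rbStepC length (boards, board, row) c = (boards, board, row ++ [c]) := by
      simp only [rbStepC]
      rw [if_neg (by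
        intro hcontra
        have h0 := Int.natCast_nonneg ((row ++ [c]).length)
        omega)]
    rw [hstep, ih, List.append_assoc]
    rfl

-- ===== VERDICT =====
theorem retrieve_boards_spec : Claim_unchanged_retrieve_boards := by
  intro lines length hdom hpre hnd
  obtain ⟨hne, -⟩ := hpre
  show retrieve_boards lines length = retrieve_boards_alt lines length
  by_cases hlen : 0 < length
  · obtain ⟨M, rfl⟩ : ∃ M : Nat, length = ((M + 1 : Nat) : Int) :=
      ⟨(length - 1).toNat, by omega⟩
    rw [portA_eq_chunks lines M, portB_eq_finish]
    rw [stream_eq M _ [] [] [] (by simp) (by simp)]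
    simp
  · -- negative length (zero is excluded by Pre_): no tokens, both sides return []
    have hneg : length < 0 := by omega
    have hsplit : PySem.Str.split₀ lines = [] := by
      by_contra h
      exact hnd ⟨hneg, h⟩
    simp [retrieve_boards, retrieve_boards_alt, hsplit, pyRange_zero_stop]

theorem retrieve_boards_changed : Claim_changed_retrieve_boards := by
  unfold Claim_changed_retrieve_boards
  decide

theorem retrieve_boards_tight : Claim_exact_retrieve_boards := by
  intro lines length hdom hpre hd
  obtain ⟨hneg, hsne⟩ := hd
  set cells : List Int :=
    (PySem.Str.split₀ lines).map (fun c => (PySem.Int.ofStr? c).getD 0) with hcells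
  have hcne : cells ≠ [] := by
    rw [hcells]
    cases h : PySem.Str.split₀ lines with
    | nil => exact absurd h hsne
    | cons a l => simp
  have hB : retrieve_boards_alt lines length = [[cells]] := by
    rw [portB_eq_finish, ← hcells, foldl_neg length hneg cells [] [] [],
      List.nil_append, rbFinish_def, if_pos hcne]
    rfl
  rw [hB]
  intro hcontra
  have hmem : ([cells] : List (List Int)) ∈ retrieve_boards lines length := by
    rw [hcontra]; simp
  simp only [retrieve_boards, ← hcells] at hmem
  rw [PySem.List.foldl_append_singleton_eq_map, List.nil_append] at hmem
  obtain ⟨i, -, hi⟩ := List.mem_map.1 hmem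
  rw [PySem.List.foldl_append_singleton_eq_map, List.nil_append] at hi
  rw [pyRange_neg_step _ length (Int.natCast_nonneg _) hneg] at hi
  simp at hi
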